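-- pv_equiv track=rewrite | github.com/mokkunsuzuki-code/stage272 | stage256/out/extracted_stage255_runner/stage255_external_runner/tools/build_claim_bundle.py | build_inclusion_proof
-- ===== SOURCE A (Python) =====
-- def build_inclusion_proof(levels, index):
--     siblings = []
--     idx = index
--
--     for level in levels[:-1]:
--         if idx % 2 == 0:
--             sibling_index = idx + 1 if idx + 1 < len(level) else idx
--             position = "right"
--         else:
--             sibling_index = idx - 1
--             position = "left"
--
--         siblings.append({
--             "position": position,
--             "hash": level[sibling_index],
--         })
--         idx //= 2
--
--     return siblings
-- ===== SOURCE B (Python) =====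
-- def build_inclusion_proof(levels, index):
--     # Structural recursion on the level list: consume the head level, recurse on the
--     # tail with the halved index. The sibling is computed uniformly (no even/odd
--     # branch): sib = idx + 1 - 2*(idx & 1), clamped back to idx when past the end.
--     def go(lvls, idx):
--         if len(lvls) <= 1:
--             return []
--         level = lvls[0]
--         bit = idx & 1
--         sib = idx + 1 - 2 * bit
--         if sib >= len(level):
--             sib = idx
--         return [{"position": "left" if bit else "right", "hash": level[sib]}] + go(lvls[1:], idx >> 1)
--     return go(levels, index)
-- ===== Notes on version B (the rewrite author's own statement) =====
-- stated objective: alternative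
-- what changed: A's iterative accumulator loop with an even/odd branch per level is replaced by structural recursion on the level list (tail + halved index), and the two-branch sibling computation is replaced by a single branch-free arithmetic formula sib = idx + 1 - 2*(idx & 1) with one range clamp; the output is built by consing, not by appending to an accumulator.
import Mathlib
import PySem

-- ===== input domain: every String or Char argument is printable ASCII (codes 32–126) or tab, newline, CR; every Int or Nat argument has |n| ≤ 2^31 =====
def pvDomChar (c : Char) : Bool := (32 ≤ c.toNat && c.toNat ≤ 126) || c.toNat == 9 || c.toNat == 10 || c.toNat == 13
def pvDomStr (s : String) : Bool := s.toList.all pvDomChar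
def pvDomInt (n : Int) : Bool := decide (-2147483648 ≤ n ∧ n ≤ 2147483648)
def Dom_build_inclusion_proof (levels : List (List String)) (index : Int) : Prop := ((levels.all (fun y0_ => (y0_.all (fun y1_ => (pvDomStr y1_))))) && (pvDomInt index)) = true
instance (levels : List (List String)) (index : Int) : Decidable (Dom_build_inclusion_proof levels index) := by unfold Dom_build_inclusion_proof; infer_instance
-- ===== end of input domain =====

-- B replaces A's accumulator loop (even/odd branch per level) by structural recursion
-- on the level list with a branch-free sibling formula; objective: alternative, same cost.

-- ===== PORT A =====
-- the body of A's for-loop, named: state is (siblings, idx); branches in A's order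
def bip_step (st : List (List (String × String)) × Int) (level : List String) :
    List (List (String × String)) × Int :=
  let idx := st.2
  if PySem.Int.mod idx 2 = 0 then
    let sib := if idx + 1 < (level.length : Int) then idx + 1 else idx
    (st.1 ++ [[("position", "right"), ("hash", PySem.List.pyGetD level sib "")]],
     PySem.Int.floordiv idx 2)
  else
    (st.1 ++ [[("position", "left"), ("hash", PySem.List.pyGetD level (idx - 1) "")]],
     PySem.Int.floordiv idx 2)

def build_inclusion_proof (levels : List (List String)) (index : Int) : List (List (String × String)) :=
  ((PySem.List.slice levels none (some (-1))).foldl bip_step ([], index)).1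

-- ===== PORT B =====
-- Source B's recursive go(lvls, idx): stop when at most one level remains, else emit the
-- head entry and recurse on the tail with idx >> 1 (Lean's Int >>> is Python-exact).
def bip_go : List (List String) → Int → List (List (String × String))
  | [], _ => []
  | [_], _ => []
  | level :: l2 :: tl, idx =>
      let bit := PySem.Int.band idx 1
      let sib0 := idx + 1 - 2 * bit
      let sib := if (level.length : Int) ≤ sib0 then idx else sib0
      [("position", if bit ≠ 0 then "left" else "right"),
       ("hash", PySem.List.pyGetD level sib "")] :: bip_go (l2 :: tl) (idx >>> (1 : Nat))

def build_inclusion_proof_alt (levels : List (List String)) (index : Int) : List (List (String × String)) :=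
  bip_go levels index

-- ===== PRECONDITION & SPEC =====
-- helper for Pre_: the sibling index A reads at level i (Python index semantics)
def pvSibIdx (index : Int) (i : Int) (len : Nat) : Int :=
  let idx := PySem.Int.floordiv index (2 ^ i.toNat)
  if PySem.Int.mod idx 2 = 0 then (if idx + 1 < (len : Int) then idx + 1 else idx)
  else idx - 1

-- Pre_ excludes exactly the inputs where A raises IndexError (the sibling index at
-- some level outside Python's accepted range for that level); A returns nowhere else.
def Pre_build_inclusion_proof (levels : List (List String)) (index : Int) : Prop :=
  ∀ p ∈ PySem.List.enumerate levels.dropLast 0,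
    PySem.Raise.InRange p.2.length (pvSibIdx index p.1 p.2.length)
instance (levels : List (List String)) (index : Int) : Decidable (Pre_build_inclusion_proof levels index) := by unfold Pre_build_inclusion_proof; infer_instance

def pvWitness_build_inclusion_proof : List (List String) × Int := ([["a", "b"], ["c", "d"], ["e"]], 0)

def Spec_build_inclusion_proof (levels : List (List String)) (index : Int) (out : List (List (String × String))) : Prop := out = build_inclusion_proof_alt levels index
instance (levels : List (List String)) (index : Int) (out : List (List (String × String))) : Decidable (Spec_build_inclusion_proof levels index out) := by unfold Spec_build_inclusion_proof; infer_instance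

-- ===== CLAIM =====
def Claim_equal_build_inclusion_proof : Prop := ∀ (levels : List (List String)) (index : Int), Dom_build_inclusion_proof levels index → Pre_build_inclusion_proof levels index → Spec_build_inclusion_proof levels index (build_inclusion_proof levels index)

-- ===== LEMMAS AND PROOFS =====

theorem pv_floordiv_floordiv (a : Int) (s : Nat) :
    PySem.Int.floordiv (PySem.Int.floordiv a (2 ^ s)) 2 = PySem.Int.floordiv a (2 ^ (s + 1)) := by
  rw [PySem.Int.floordiv_eq_ediv_of_pos (by positivity),
    PySem.Int.floordiv_eq_ediv_of_pos (by norm_num),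
    PySem.Int.floordiv_eq_ediv_of_pos (by positivity),
    Int.ediv_ediv_of_nonneg (by positivity)]
  ring_nf

theorem pv_shiftr_one (a : Int) : a >>> (1 : Nat) = PySem.Int.floordiv a 2 := by
  rw [Int.shiftRight_eq_div_pow, PySem.Int.floordiv_eq_ediv_of_pos (by norm_num)]
  norm_num

-- the main invariant: the fold over the remaining levels equals B's recursion,
-- given Pre_'s in-range facts for those levels (shifted by s)
theorem pv_fold_go (index : Int) : ∀ (lvls : List (List String)) (s : Nat)
    (acc : List (List (String × String))),
    (∀ p ∈ PySem.List.enumerate lvls.dropLast (s : Int),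
      PySem.Raise.InRange p.2.length (pvSibIdx index p.1 p.2.length)) →
    (lvls.dropLast.foldl bip_step (acc, PySem.Int.floordiv index (2 ^ s))).1
      = acc ++ bip_go lvls (PySem.Int.floordiv index (2 ^ s)) := by
  intro lvls
  induction lvls with
  | nil => intro s acc _; simp [bip_go]
  | cons level tl ih =>
    intro s acc hpre
    cases tl with
    | nil => simp [bip_go]
    | cons l2 tl' =>
      have hdl : (level :: l2 :: tl').dropLast = level :: (l2 :: tl').dropLast := by
        simp [List.dropLast_cons_of_ne_nil]
      rw [hdl, List.foldl_cons]
      set idx := PySem.Int.floordiv index (2 ^ s) with hidx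
      have hhead := hpre ((s : Int), level)
        (by rw [hdl, PySem.List.enumerate_cons]; exact List.mem_cons_self ..)
      have htail : ∀ p ∈ PySem.List.enumerate (l2 :: tl').dropLast ((s + 1 : Nat) : Int),
          PySem.Raise.InRange p.2.length (pvSibIdx index p.1 p.2.length) := by
        intro p hp
        apply hpre
        rw [hdl, PySem.List.enumerate_cons]
        have : ((s : Int) + 1) = ((s + 1 : Nat) : Int) := by push_cast; ring
        rw [this]
        exact List.mem_cons_of_mem _ hp
      have hsib : pvSibIdx index (s : Int) level.length =
          (if PySem.Int.mod idx 2 = 0 then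
            (if idx + 1 < (level.length : Int) then idx + 1 else idx) else idx - 1) := by
        simp [pvSibIdx, hidx]
      -- B's head entry and new index
      have hbit := PySem.Int.band_one idx
      by_cases hmod : PySem.Int.mod idx 2 = 0
      · -- even: A takes the "right" branch; B's bit = 0
        have hstep : bip_step (acc, idx) level =
            (acc ++ [[("position", "right"),
              ("hash", PySem.List.pyGetD level
                (if idx + 1 < (level.length : Int) then idx + 1 else idx) "")]],
             PySem.Int.floordiv idx 2) := by
          simp only [bip_step]
          rw [if_pos hmod]
        rw [hstep, pv_floordiv_floordiv, ih (s + 1) _ htail]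
        have hgo : bip_go (level :: l2 :: tl') idx =
            [("position", "right"),
             ("hash", PySem.List.pyGetD level
               (if idx + 1 < (level.length : Int) then idx + 1 else idx) "")]
              :: bip_go (l2 :: tl') (PySem.Int.floordiv index (2 ^ (s + 1))) := by
          have hif : (if (level.length : Int) ≤ idx + 1 - 2 * 0 then idx else idx + 1 - 2 * 0)
              = (if idx + 1 < (level.length : Int) then idx + 1 else idx) := by
            split_ifs <;> omega
          simp only [bip_go, hbit, hmod, hif, pv_shiftr_one]
          rw [hidx, pv_floordiv_floordiv]
          norm_num
        rw [hgo]; simp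
      · -- odd: A takes the "left" branch; B's bit = 1 and Pre_ rules out the clamp
        have hone : PySem.Int.mod idx 2 = 1 := by
          have h0 := PySem.Int.mod_nonneg idx (b := 2) (by norm_num)
          have h1 := PySem.Int.mod_lt idx (b := 2) (by norm_num)
          omega
        have hnoclamp : ¬ ((level.length : Int) ≤ idx - 1) := by
          have h : PySem.Raise.InRange level.length
              (pvSibIdx index (s : Int) level.length) := hhead
          rw [hsib] at h
          rw [hone] at h
          norm_num at h
          rcases h with ⟨_, hlt⟩
          omega
        have hstep : bip_step (acc, idx) level =
            (acc ++ [[("position", "left"),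
              ("hash", PySem.List.pyGetD level (idx - 1) "")]],
             PySem.Int.floordiv idx 2) := by
          simp only [bip_step]
          rw [hone]
          norm_num
        rw [hstep, pv_floordiv_floordiv, ih (s + 1) _ htail]
        have hgo : bip_go (level :: l2 :: tl') idx =
            [("position", "left"), ("hash", PySem.List.pyGetD level (idx - 1) "")]
              :: bip_go (l2 :: tl') (PySem.Int.floordiv index (2 ^ (s + 1))) := by
          have hif : (if (level.length : Int) ≤ idx + 1 - 2 * 1 then idx else idx + 1 - 2 * 1)
              = idx - 1 := by
            rw [if_neg (by omega)]; ring
          simp only [bip_go, hbit, hone, hif, pv_shiftr_one]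
          rw [hidx, pv_floordiv_floordiv]
          norm_num
        rw [hgo]; simp

-- ===== VERDICT =====
theorem build_inclusion_proof_spec : Claim_equal_build_inclusion_proof := by
  intro levels index _ hpre
  unfold Spec_build_inclusion_proof build_inclusion_proof build_inclusion_proof_alt
  have h1 : PySem.Int.floordiv index (2 ^ 0) = index := by
    rw [pow_zero, PySem.Int.floordiv_eq_ediv_of_pos (by norm_num), Int.ediv_one]
  have key := pv_fold_go index levels 0 []
    (fun p hp => hpre p (by simpa using hp))
  rw [h1] at key
  rw [PySem.List.slice_to_neg_one]
  simpa using key
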